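-- pv_equiv track=rewrite | github.com/teomoney1999/error_diffusion | try.py | diffusor
-- ===== SOURCE A (Python) =====
-- def diffusor(arr, f):
--     for i in range(len(arr)):
--         for j in range(len(arr[i])):
--             current = arr[i][j]
--             error = 0
--
--             if current < f:
--                 arr[i][j] = 0
--             elif current > f:
--                 arr[i][j] = 255
--
--             error = current - arr[i][j]
--
--             if j < len(arr[i]) - 1:
--                 arr[i][j+1] += error
--     return arr
-- ===== SOURCE B (Python) =====
-- def diffusor(arr, f):
--     for row in arr:
--         # stage 1: prefix sums of the original row
--         prefix = []
--         s = 0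
--         for x in row:
--             s += x
--             prefix.append(s)
--         # stage 2: current value at j = prefix[j] - sum of outputs already emitted
--         emitted = 0
--         for j in range(len(row)):
--             cur = prefix[j] - emitted
--             out = 0 if cur < f else (255 if cur > f else cur)
--             row[j] = out
--             emitted += out
--     return arr
-- ===== Notes on version B (the rewrite author's own statement) =====
-- stated objective: alternative
-- what changed: Replaces A's neighbour-mutating error push with a two-stage prefix-sum formulation per row: first build the row's prefix sums, then emit each output as threshold(prefix[j] - sum of outputs emitted so far), using the identity that the diffused value at j equals the prefix sum minus the emitted total; no error/carry variable and no write into unprocessed cells.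
import Mathlib
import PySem

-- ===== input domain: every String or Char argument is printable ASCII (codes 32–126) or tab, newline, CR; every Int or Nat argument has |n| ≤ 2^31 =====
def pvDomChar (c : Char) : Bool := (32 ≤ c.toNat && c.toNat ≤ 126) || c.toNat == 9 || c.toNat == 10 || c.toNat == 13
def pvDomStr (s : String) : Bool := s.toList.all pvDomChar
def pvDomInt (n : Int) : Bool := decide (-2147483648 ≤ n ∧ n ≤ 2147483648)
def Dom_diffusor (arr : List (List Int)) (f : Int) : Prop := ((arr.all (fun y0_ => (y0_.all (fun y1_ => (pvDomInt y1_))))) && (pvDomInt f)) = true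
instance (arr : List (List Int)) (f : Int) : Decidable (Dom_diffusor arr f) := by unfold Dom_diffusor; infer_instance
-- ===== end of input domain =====

-- B replaces A's neighbour-mutating error push by a two-stage prefix-sum formulation
-- per row (alternative decomposition, same cost). Both A and B mutate the argument in
-- place in Python; the equivalence proved here is about the return value.

-- ===== PORT A =====
-- inner loop body of A for one row: r is the (partially mutated) row, j the column
def stepA (f : Int) (r : List Int) (j : Nat) : List Int :=
  let current := r.getD j 0
  let r2 := if current < f then r.set j 0 else if current > f then r.set j 255 else r
  let error := current - r2.getD j 0
  if j < r.length - 1 then r2.set (j+1) (r2.getD (j+1) 0 + error) else r2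

-- inner 'for j in range(len(arr[i]))' loop of A
def diffusorRowA (f : Int) (row : List Int) : List Int :=
  (List.range row.length).foldl (stepA f) row

-- outer 'for i in range(len(arr))' loop (only arr[i] is touched by iteration i)
def diffusor (arr : List (List Int)) (f : Int) : List (List Int) :=
  (List.range arr.length).foldl (fun a i => a.set i (diffusorRowA f (a.getD i []))) arr

-- ===== PORT B =====
-- stage 1 of B: prefix sums of the original row (running sum s)
def prefixSums : Int → List Int → List Int
  | _, [] => []
  | s, x :: xs => (s + x) :: prefixSums (s + x) xs

-- stage 2 of B: output at j = threshold(prefix[j] - emitted), accumulating emitted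
def outsB (f : Int) : Int → List Int → List Int
  | _, [] => []
  | emitted, p :: ps =>
    let cur := p - emitted
    let out := if cur < f then 0 else if cur > f then 255 else cur
    out :: outsB f (emitted + out) ps

def diffusor_alt (arr : List (List Int)) (f : Int) : List (List Int) :=
  arr.map (fun row => outsB f 0 (prefixSums 0 row))

-- ===== PRECONDITION & SPEC =====
def Spec_diffusor (arr : List (List Int)) (f : Int) (out : List (List Int)) : Prop := out = diffusor_alt arr f
instance (arr : List (List Int)) (f : Int) (out : List (List Int)) : Decidable (Spec_diffusor arr f out) := by unfold Spec_diffusor; infer_instance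

-- ===== CLAIM (what is proved, stated in full; the proofs are below) =====
def Claim_equal_diffusor : Prop := ∀ (arr : List (List Int)) (f : Int), Dom_diffusor arr f → Spec_diffusor arr f (diffusor arr f)

-- ===== LEMMAS AND PROOFS =====

-- proof-only intermediate: A's row loop seen as a carry-threaded recursion
def carryRow (f : Int) : Int → List Int → List Int
  | _, [] => []
  | carry, x :: xs =>
    let current := x + carry
    let out := if current < f then 0 else if current > f then 255 else current
    out :: carryRow f (current - out) xs

-- add a carry onto the head of the (unprocessed) suffix of a row
def addCarry (c : Int) : List Int → List Int
  | [] => []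
  | x :: xs => (x + c) :: xs

lemma addCarry_zero (l : List Int) : addCarry 0 l = l := by
  cases l <;> simp [addCarry]

lemma getD_at {α : Type} (d : α) : ∀ (pre : List α) (y : α) (t : List α),
    (pre ++ y :: t).getD pre.length d = y := by
  intro pre
  induction pre with
  | nil => intro y t; rfl
  | cons a l ih => intro y t; simp

lemma set_at {α : Type} : ∀ (pre : List α) (y z : α) (t : List α),
    (pre ++ y :: t).set pre.length z = pre ++ z :: t := by
  intro pre
  induction pre with
  | nil => intro y z t; rfl
  | cons a l ih => intro y z t; simp [ih y z t]

lemma stepA_eq (f : Int) (pre : List Int) (c : Int) (xs : List Int) :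
    stepA f (pre ++ c :: xs) pre.length =
      (pre ++ [if c < f then 0 else if c > f then 255 else c]) ++
        addCarry (c - (if c < f then 0 else if c > f then 255 else c)) xs := by
  set out : Int := if c < f then 0 else if c > f then 255 else c with hout
  unfold stepA
  dsimp only
  rw [getD_at]
  have hr2 : (if c < f then (pre ++ c :: xs).set pre.length 0
      else if c > f then (pre ++ c :: xs).set pre.length 255
      else (pre ++ c :: xs)) = pre ++ out :: xs := by
    split_ifs with h1 h2
    · rw [set_at, hout, if_pos h1]
    · rw [set_at, hout, if_neg h1, if_pos h2]
    · rw [hout, if_neg h1, if_neg h2]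
  rw [hr2, getD_at]
  have hlen : (pre ++ c :: xs).length - 1 = pre.length + xs.length := by
    simp
  rw [hlen]
  cases xs with
  | nil => simp [addCarry]
  | cons x2 rest =>
    have hcond : pre.length < pre.length + (x2 :: rest).length := by simp
    rw [if_pos hcond]
    have h1 : pre ++ out :: x2 :: rest = (pre ++ [out]) ++ x2 :: rest := by simp
    have h2 : pre.length + 1 = (pre ++ [out]).length := by simp
    rw [h1, h2, getD_at, set_at]
    simp [addCarry]

lemma rowA_aux (f : Int) : ∀ (suf pre : List Int) (carry : Int),
    (List.range' pre.length suf.length).foldl (stepA f) (pre ++ addCarry carry suf)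
      = pre ++ carryRow f carry suf := by
  intro suf
  induction suf with
  | nil => intro pre carry; simp [addCarry, carryRow]
  | cons x xs ih =>
    intro pre carry
    rw [List.length_cons, List.range'_succ, List.foldl_cons]
    show (List.range' (pre.length + 1) xs.length).foldl (stepA f)
        (stepA f (pre ++ (x + carry) :: xs) pre.length) = _
    rw [stepA_eq]
    have h2 : pre.length + 1 = (pre ++ [if x + carry < f then 0 else if x + carry > f then 255 else x + carry]).length := by simp
    rw [h2, ih]
    simp [carryRow]

-- B's prefix-sum stage pair computes the same row as the carry recursion
lemma outsB_eq_carryRow (f : Int) : ∀ (row : List Int) (s emitted : Int),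
    outsB f emitted (prefixSums s row) = carryRow f (s - emitted) row := by
  intro row
  induction row with
  | nil => intro s emitted; simp [prefixSums, outsB, carryRow]
  | cons x xs ih =>
    intro s emitted
    simp only [prefixSums, outsB, carryRow]
    have hc : s + x - emitted = x + (s - emitted) := by ring
    rw [hc]
    set cur : Int := x + (s - emitted) with hcur
    set out : Int := if cur < f then 0 else if cur > f then 255 else cur with hout
    rw [ih (s + x) (emitted + out)]
    have : s + x - (emitted + out) = cur - out := by rw [hcur]; ring
    rw [this]

lemma rowA_eq (f : Int) (row : List Int) :
    diffusorRowA f row = outsB f 0 (prefixSums 0 row) := by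
  rw [outsB_eq_carryRow]
  have h := rowA_aux f row [] (0 - 0)
  simpa [diffusorRowA, addCarry_zero, List.range_eq_range'] using h

lemma outer_aux (f : Int) : ∀ (suf pre : List (List Int)),
    (List.range' pre.length suf.length).foldl
        (fun a i => a.set i (diffusorRowA f (a.getD i []))) (pre ++ suf)
      = pre ++ suf.map (fun r => outsB f 0 (prefixSums 0 r)) := by
  intro suf
  induction suf with
  | nil => intro pre; simp
  | cons x xs ih =>
    intro pre
    rw [List.length_cons, List.range'_succ, List.foldl_cons]
    show (List.range' (pre.length + 1) xs.length).foldl _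
        ((pre ++ x :: xs).set pre.length (diffusorRowA f ((pre ++ x :: xs).getD pre.length []))) = _
    rw [getD_at, set_at, rowA_eq]
    have h1 : pre ++ outsB f 0 (prefixSums 0 x) :: xs = (pre ++ [outsB f 0 (prefixSums 0 x)]) ++ xs := by simp
    have h2 : pre.length + 1 = (pre ++ [outsB f 0 (prefixSums 0 x)]).length := by simp
    rw [h1, h2, ih]
    simp

-- ===== VERDICT (by name: the statement is the Claim_ definition above) =====
theorem diffusor_spec : Claim_equal_diffusor := by
  intro arr f _
  show diffusor arr f = diffusor_alt arr f
  have h := outer_aux f arr []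
  simpa [diffusor, diffusor_alt, List.range_eq_range'] using h
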